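-- pv_equiv track=rewrite | github.com/IMAiCool/AdGuardHome-Rules | handle_hierarchy_conflicts.py | find_hierarchy_conflicts_with_lines
-- ===== SOURCE A (Python) =====
-- def get_parent_domain(domain):
--     parts = domain.split('.')
--     if len(parts) <= 1:
--         return None
--     return '.'.join(parts[1:])
--
-- def find_hierarchy_conflicts_with_lines(domain_line_map):
--     """
--     domain_line_map: {域名: 行号}
--     返回 (keep_set, to_delete_dict)
--     to_delete_dict: {被删域名: (其所在行号, 上级域名, 上级行号)}
--     """
--     domains = set(domain_line_map.keys())
--     to_delete = {}
--
--     for domain in domains: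
--         parent = get_parent_domain(domain)
--         while parent:
--             if parent in domains:
--                 to_delete[domain] = (domain_line_map[domain], parent, domain_line_map[parent])
--                 break
--             parent = get_parent_domain(parent)
--
--     keep = domains - set(to_delete.keys())
--     return keep, to_delete
-- ===== SOURCE B (Python) =====
-- def find_hierarchy_conflicts_with_lines(domain_line_map):
--     """
--     domain_line_map: {域名: 行号}
--     返回 (keep_set, to_delete_dict)
--     """
--     domains = set(domain_line_map)
--
--     def best_ancestor(d):
--         # nearest existing proper ancestor = the present domain whose label list
--         # is the LONGEST proper suffix of d's label list (empty string never counts)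
--         dl = d.split('.')
--         best = None
--         for e in domains:
--             el = e.split('.')
--             if e and len(el) < len(dl) and dl[len(dl) - len(el):] == el:
--                 if best is None or len(best.split('.')) < len(el):
--                     best = e
--         return best
--
--     to_delete = {d: (domain_line_map[d], b, domain_line_map[b])
--                  for d in domains
--                  if (b := best_ancestor(d)) is not None}
--     keep = {d for d in domains if best_ancestor(d) is None}
--     return keep, to_delete
-- ===== Notes on version B (the rewrite author's own statement) =====
-- stated objective: alternative
-- what changed: Instead of walking each domain's parent chain upward with repeated split/join and set membership tests, B scans the domain set pairwise and keeps, for each domain, the present domain whose label list is the longest proper suffix of its label list (the nearest existing ancestor); to_delete is built as a dict comprehension and keep as a set comprehension over that test.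
import Mathlib
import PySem

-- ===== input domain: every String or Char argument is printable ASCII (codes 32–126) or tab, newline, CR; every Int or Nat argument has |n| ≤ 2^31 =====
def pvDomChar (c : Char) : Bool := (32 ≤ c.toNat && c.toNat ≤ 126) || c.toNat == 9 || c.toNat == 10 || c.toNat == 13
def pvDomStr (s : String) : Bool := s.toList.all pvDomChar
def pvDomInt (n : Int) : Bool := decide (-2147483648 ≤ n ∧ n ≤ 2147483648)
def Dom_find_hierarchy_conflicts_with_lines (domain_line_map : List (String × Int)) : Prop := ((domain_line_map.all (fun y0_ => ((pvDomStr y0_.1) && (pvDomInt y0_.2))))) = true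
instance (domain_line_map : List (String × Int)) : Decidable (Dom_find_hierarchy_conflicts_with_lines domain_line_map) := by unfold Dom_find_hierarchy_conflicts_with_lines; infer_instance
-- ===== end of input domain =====

-- B replaces A's per-domain parent-chain walk (repeated split/join and membership probes) by a
-- pairwise longest-proper-label-suffix scan over the domain set (objective: alternative, not faster).
-- Python iterates a hash-ordered set; keep is a set and to_delete a dict, both compared ignoring order.

-- ===== PORT A =====

def get_parent_domain (domain : String) : Option String :=
  let parts := PySem.Chars.splitOn domain.toList ['.']
  if parts.length ≤ 1 then none
  else some (String.ofList (PySem.Chars.join ['.'] (PySem.List.slice parts (some 1) none)))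

def whileParent (domains : PySem.Set String) : Option String → Nat → Option String
  | none, _ => none
  | some _, 0 => none
  | some p, fuel+1 =>
      if p = "" then none
      else if PySem.Set.contains domains p then some p
      else whileParent domains (get_parent_domain p) fuel

def find_hierarchy_conflicts_with_lines (domain_line_map : List (String × Int)) : List String × (List (String × Int × String × Int)) :=
  let domains : PySem.Set String := PySem.Set.ofList (domain_line_map.map Prod.fst)
  let lineMap : PySem.Dict String Int := PySem.Dict.ofList domain_line_map
  let to_delete : PySem.Dict String (Int × String × Int) :=
    domains.foldl (fun td domain =>
      match whileParent domains (get_parent_domain domain) ((PySem.Chars.splitOn domain.toList ['.']).length) with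
      | some parent => td.insert domain (lineMap.getD domain 0, parent, lineMap.getD parent 0)
      | none => td) PySem.Dict.empty
  (PySem.Set.diff domains (PySem.Set.ofList (PySem.Dict.keys to_delete)), to_delete.items)

-- ===== PORT B =====

def pvLabels (s : String) : List (List Char) := PySem.Chars.splitOn s.toList ['.']

def best_ancestor (domains : PySem.Set String) (d : String) : Option String :=
  let dl := pvLabels d
  domains.foldl (fun best e =>
    let el := pvLabels e
    if e ≠ "" ∧ el.length < dl.length ∧ dl.drop (dl.length - el.length) = el then
      match best with
      | none => some e
      | some b => if (pvLabels b).length < el.length then some e else best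
    else best) none

def find_hierarchy_conflicts_with_lines_alt (domain_line_map : List (String × Int)) : List String × (List (String × Int × String × Int)) :=
  let domains : PySem.Set String := PySem.Set.ofList (domain_line_map.map Prod.fst)
  let lineMap : PySem.Dict String Int := PySem.Dict.ofList domain_line_map
  let to_delete : PySem.Dict String (Int × String × Int) :=
    PySem.Dict.ofList (domains.filterMap (fun d =>
      (best_ancestor domains d).map (fun b => (d, (lineMap.getD d 0, b, lineMap.getD b 0)))))
  let keep := domains.filter (fun d => (best_ancestor domains d).isNone)
  (keep, to_delete.items)

-- ===== PRECONDITION & SPEC =====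
def Spec_find_hierarchy_conflicts_with_lines (domain_line_map : List (String × Int)) (out : List String × (List (String × Int × String × Int))) : Prop := out = find_hierarchy_conflicts_with_lines_alt domain_line_map
instance (domain_line_map : List (String × Int)) (out : List String × (List (String × Int × String × Int))) : Decidable (Spec_find_hierarchy_conflicts_with_lines domain_line_map out) := by unfold Spec_find_hierarchy_conflicts_with_lines; infer_instance

-- ===== CLAIM (what is proved, stated in full; the proofs are below) =====
def Claim_equal_find_hierarchy_conflicts_with_lines : Prop := ∀ (domain_line_map : List (String × Int)), Dom_find_hierarchy_conflicts_with_lines domain_line_map → Spec_find_hierarchy_conflicts_with_lines domain_line_map (find_hierarchy_conflicts_with_lines domain_line_map)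

-- ===== LEMMAS AND PROOFS =====

def splitD (pre : List Char) : List Char → List (List Char)
  | [] => [pre]
  | c :: rest => if c = '.' then pre :: splitD [] rest else splitD (pre ++ [c]) rest

lemma go_eq (l : List Char) : ∀ (fuel : Nat) (cur : List Char) (acc : List (List Char)),
    l.length ≤ fuel →
    PySem.Chars.splitOn.go ['.'] fuel l cur acc = acc.reverse ++ splitD cur.reverse l := by
  induction l with
  | nil =>
    intro fuel cur acc _
    cases fuel <;> simp [PySem.Chars.splitOn.go, splitD]
  | cons c rest ih =>
    intro fuel cur acc hle
    cases fuel with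
    | zero => simp at hle
    | succ fuel =>
      rw [show PySem.Chars.splitOn.go ['.'] (fuel+1) (c::rest) cur acc =
          (if ['.'].isPrefixOf (c::rest) = true then
            PySem.Chars.splitOn.go ['.'] fuel (List.drop 1 (c::rest)) [] (cur.reverse :: acc)
          else PySem.Chars.splitOn.go ['.'] fuel rest (c :: cur) acc) from rfl]
      simp only [List.length_cons, Nat.add_le_add_iff_right] at hle
      by_cases hc : c = '.'
      · subst hc
        rw [if_pos (by simp [List.isPrefixOf])]
        simp only [List.drop_succ_cons, List.drop_zero]
        rw [ih fuel [] (cur.reverse :: acc) hle]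
        simp [splitD]
      · rw [if_neg (by simp [List.isPrefixOf]; exact fun h => hc h.symm)]
        rw [ih fuel (c :: cur) acc hle]
        simp [splitD, hc]

lemma splitOn_eq_splitD (s : List Char) : PySem.Chars.splitOn s ['.'] = splitD [] s := by
  rw [PySem.Chars.splitOn, go_eq s (s.length + 1) [] [] (by omega)]
  simp

lemma splitD_ne_nil (l : List Char) : ∀ pre, splitD pre l ≠ [] := by
  induction l with
  | nil => intro pre; simp [splitD]
  | cons c rest ih => intro pre; by_cases hc : c = '.' <;> simp [splitD, hc, ih]

lemma mem_splitD_no_dot (l : List Char) : ∀ pre m, ('.' ∉ pre) → m ∈ splitD pre l → '.' ∉ m := by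
  induction l with
  | nil => intro pre m h hm; simp [splitD] at hm; subst hm; exact h
  | cons c rest ih =>
    intro pre m h hm
    by_cases hc : c = '.'
    · simp [splitD, hc] at hm
      rcases hm with rfl | hm
      · exact h
      · exact ih [] m (by simp) hm
    · simp [splitD, hc] at hm
      exact ih (pre ++ [c]) m (by simp [h, Ne.symm hc]) hm

lemma ic_singleton (x : List Char) : List.intercalate ['.'] [x] = x := by
  simp [List.intercalate]

lemma ic_cons (x y : List Char) (ys : List (List Char)) :
    List.intercalate ['.'] (x :: y :: ys) = x ++ '.' :: List.intercalate ['.'] (y :: ys) := by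
  simp [List.intercalate, List.intersperse]

lemma intercalate_splitD (l : List Char) : ∀ pre, List.intercalate ['.'] (splitD pre l) = pre ++ l := by
  induction l with
  | nil => intro pre; simp [splitD, ic_singleton]
  | cons c rest ih =>
    intro pre
    by_cases hc : c = '.'
    · subst hc
      rw [show splitD pre ('.' :: rest) = pre :: splitD [] rest by simp [splitD]]
      rcases hd : splitD [] rest with _ | ⟨x, xs⟩
      · exact absurd hd (splitD_ne_nil rest [])
      · rw [ic_cons, ← hd, ih []]
        simp
    · rw [show splitD pre (c :: rest) = splitD (pre ++ [c]) rest by simp [splitD, hc]]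
      rw [ih (pre ++ [c])]
      simp

lemma splitD_of_no_dot (l : List Char) : ∀ pre, ('.' ∉ l) → splitD pre l = [pre ++ l] := by
  induction l with
  | nil => intro pre _; simp [splitD]
  | cons c rest ih =>
    intro pre h
    simp only [List.mem_cons, not_or] at h
    rw [show splitD pre (c :: rest) = splitD (pre ++ [c]) rest by simp [splitD, Ne.symm h.1]]
    rw [ih (pre ++ [c]) h.2]
    simp

lemma splitD_append_dot (l : List Char) : ∀ pre (r : List Char), ('.' ∉ l) →
    splitD pre (l ++ '.' :: r) = (pre ++ l) :: splitD [] r := by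
  induction l with
  | nil => intro pre r _; simp [splitD]
  | cons c rest ih =>
    intro pre r h
    simp only [List.mem_cons, not_or] at h
    simp only [List.cons_append]
    rw [show splitD pre (c :: (rest ++ '.' :: r)) = splitD (pre ++ [c]) (rest ++ '.' :: r) by
      simp [splitD, Ne.symm h.1]]
    rw [ih (pre ++ [c]) r h.2]
    simp

lemma splitD_intercalate (parts : List (List Char)) : parts ≠ [] →
    (∀ m ∈ parts, '.' ∉ m) →
    splitD [] (List.intercalate ['.'] parts) = parts := by
  induction parts with
  | nil => intro h; exact absurd rfl h
  | cons x xs ih =>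
    intro _ hdot
    rcases xs with _ | ⟨y, ys⟩
    · rw [ic_singleton, splitD_of_no_dot x [] (hdot x (by simp))]
      simp
    · rw [ic_cons, splitD_append_dot x [] _ (hdot x (by simp))]
      simp only [List.nil_append]
      rw [ih (by simp) (fun m hm => hdot m (by simp [hm]))]

def elemS (t : List (List Char)) : String := String.ofList (List.intercalate ['.'] t)

lemma labels_eq_splitD (s : String) : pvLabels s = splitD [] s.toList := by
  rw [pvLabels, splitOn_eq_splitD]

lemma labels_ne_nil (s : String) : pvLabels s ≠ [] := by
  rw [labels_eq_splitD]; exact splitD_ne_nil _ _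

lemma labels_no_dot (s : String) : ∀ m ∈ pvLabels s, '.' ∉ m := by
  rw [labels_eq_splitD]
  intro m hm
  exact mem_splitD_no_dot _ [] m (by simp) hm

lemma labels_elemS (t : List (List Char)) (hne : t ≠ []) (hdot : ∀ m ∈ t, '.' ∉ m) :
    pvLabels (elemS t) = t := by
  rw [labels_eq_splitD, elemS, String.toList_ofList]
  exact splitD_intercalate t hne hdot

lemma elemS_labels (s : String) : elemS (pvLabels s) = s := by
  rw [elemS, labels_eq_splitD, intercalate_splitD]
  simp [String.ofList_toList]

lemma intercalate_eq_nil (t : List (List Char)) (h : List.intercalate ['.'] t = []) :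
    t = [] ∨ t = [[]] := by
  rcases t with _ | ⟨x, xs⟩
  · exact Or.inl rfl
  · rcases xs with _ | ⟨y, ys⟩
    · rw [ic_singleton] at h; right; rw [h]
    · rw [ic_cons] at h; simp at h

lemma get_parent_eq (s : String) :
    get_parent_domain s = if (pvLabels s).tail = [] then none else some (elemS (pvLabels s).tail) := by
  rw [get_parent_domain]
  have hs : PySem.Chars.splitOn s.toList ['.'] = pvLabels s := rfl
  simp only [hs]
  rcases hL : pvLabels s with _ | ⟨x, xs⟩
  · exact absurd hL (labels_ne_nil s)
  · rcases xs with _ | ⟨y, ys⟩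
    · simp
    · simp only [List.length_cons]
      rw [if_neg (by simp), PySem.List.slice_from _ (by norm_num : (0:Int) ≤ 1)]
      simp [PySem.Chars.join, elemS]

def chainF (domains : PySem.Set String) : List (List Char) → Option String
  | [] => none
  | x :: r =>
      let s := elemS (x :: r)
      if s = "" then none
      else if PySem.Set.contains domains s then some s
      else chainF domains r

def goodT (domains : PySem.Set String) (t : List (List Char)) : Prop :=
  t ≠ [] ∧ elemS t ≠ "" ∧ elemS t ∈ domains

lemma whileParent_eq_chainF (domains : PySem.Set String) :
    ∀ (t : List (List Char)) (fuel : Nat), t ≠ [] → (∀ m ∈ t, '.' ∉ m) → t.length ≤ fuel →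
    whileParent domains (some (elemS t)) fuel = chainF domains t := by
  intro t
  induction t with
  | nil => intro fuel h; exact absurd rfl h
  | cons x r ih =>
    intro fuel _ hdot hle
    rcases fuel with _ | f
    · simp at hle
    · rw [whileParent, chainF]
      by_cases hz : elemS (x :: r) = ""
      · simp [hz]
      · rw [if_neg hz, if_neg hz]
        by_cases hc : PySem.Set.contains domains (elemS (x :: r)) = true
        · rw [if_pos hc, if_pos hc]
        · rw [if_neg hc, if_neg hc]
          rw [get_parent_eq, labels_elemS (x :: r) (by simp) hdot]
          simp only [List.tail_cons]
          rcases r with _ | ⟨y, ys⟩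
          · simp [whileParent, chainF]
          · rw [if_neg (by simp)]
            exact ih f (by simp) (fun m hm => hdot m (by simp [hm]))
              (by simp only [List.length_cons] at hle ⊢; omega)

lemma chainF_none (domains : PySem.Set String) :
    ∀ (u : List (List Char)),
    chainF domains u = none → ∀ t, t <:+ u → ¬ goodT domains t := by
  intro u
  induction u with
  | nil =>
    intro _ t ht
    rw [List.suffix_nil] at ht
    subst ht
    exact fun hg => hg.1 rfl
  | cons x r ih =>
    intro hch t ht hg
    rw [chainF] at hch
    by_cases hz : elemS (x :: r) = ""
    · have hii := intercalate_eq_nil (x :: r) (by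
        have h2 : (elemS (x :: r)).toList = [] := by rw [hz]; rfl
        rwa [elemS, String.toList_ofList] at h2)
      rcases hii with h | h
      · simp at h
      · rw [h] at ht hz
        rw [List.suffix_cons_iff] at ht
        rcases ht with rfl | ht
        · exact hg.2.1 hz
        · rw [List.suffix_nil] at ht
          exact hg.1 ht
    · rw [if_neg hz] at hch
      by_cases hc : PySem.Set.contains domains (elemS (x :: r)) = true
      · rw [if_pos hc] at hch; simp at hch
      · rw [if_neg hc] at hch
        rw [List.suffix_cons_iff] at ht
        rcases ht with rfl | ht
        · exact hc ((PySem.Set.contains_iff _ _).mpr hg.2.2)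
        · exact ih hch t ht hg

lemma chainF_some (domains : PySem.Set String) :
    ∀ (u : List (List Char)) (s : String),
    chainF domains u = some s →
    ∃ t, t <:+ u ∧ goodT domains t ∧ s = elemS t ∧
      ∀ t', t' <:+ u → goodT domains t' → t'.length ≤ t.length := by
  intro u
  induction u with
  | nil => intro s h; simp [chainF] at h
  | cons x r ih =>
    intro s hch
    rw [chainF] at hch
    by_cases hz : elemS (x :: r) = ""
    · simp [hz] at hch
    · rw [if_neg hz] at hch
      by_cases hc : PySem.Set.contains domains (elemS (x :: r)) = true
      · rw [if_pos hc] at hch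
        simp only [Option.some.injEq] at hch
        refine ⟨x :: r, List.suffix_refl _, ⟨by simp, hz, (PySem.Set.contains_iff _ _).mp hc⟩, hch.symm, ?_⟩
        intro t' ht' _
        exact ht'.length_le
      · rw [if_neg hc] at hch
        obtain ⟨t, htu, hg, hs, hmax⟩ := ih s hch
        refine ⟨t, List.suffix_cons_iff.mpr (Or.inr htu), hg, hs, ?_⟩
        intro t' ht' hg'
        rw [List.suffix_cons_iff] at ht'
        rcases ht' with rfl | ht'
        · exact absurd ((PySem.Set.contains_iff _ _).mpr hg'.2.2) hc
        · exact hmax t' ht' hg'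

def candB (d e : String) : Prop :=
  e ≠ "" ∧ (pvLabels e).length < (pvLabels d).length ∧
    (pvLabels d).drop ((pvLabels d).length - (pvLabels e).length) = pvLabels e

lemma ancA_eq_chainF (domains : PySem.Set String) (d : String) :
    whileParent domains (get_parent_domain d) ((PySem.Chars.splitOn d.toList ['.']).length)
      = chainF domains (pvLabels d).tail := by
  have hs : PySem.Chars.splitOn d.toList ['.'] = pvLabels d := rfl
  rw [hs, get_parent_eq]
  rcases ht : (pvLabels d).tail with _ | ⟨y, ys⟩
  · simp [whileParent, chainF]
  · rw [if_neg (by simp), ← ht]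
    have h1 : (pvLabels d).tail ≠ [] := by rw [ht]; simp
    have h2 : ∀ m ∈ (pvLabels d).tail, '.' ∉ m :=
      fun m hm => labels_no_dot d m (List.mem_of_mem_tail hm)
    have h3 : (pvLabels d).tail.length ≤ (pvLabels d).length := by
      rcases hL : pvLabels d with _ | ⟨x, xs⟩
      · exact absurd hL (labels_ne_nil d)
      · simp
    exact whileParent_eq_chainF domains _ _ h1 h2 h3

lemma suffix_of_tail {α : Type} {t : List α} {l : List α} (h : t <:+ l.tail) : t <:+ l := by
  rcases l with _ | ⟨x, xs⟩
  · simpa using h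
  · exact List.suffix_cons_iff.mpr (Or.inr (by simpa using h))

lemma candB_iff (domains : PySem.Set String) (d e : String) (he : e ∈ domains) :
    candB d e ↔ (goodT domains (pvLabels e) ∧ pvLabels e <:+ (pvLabels d).tail) := by
  constructor
  · rintro ⟨h1, h2, h3⟩
    have hsuf : pvLabels e <:+ pvLabels d := List.suffix_iff_eq_drop.mpr h3.symm
    refine ⟨⟨labels_ne_nil e, by rw [elemS_labels]; exact h1, by rw [elemS_labels]; exact he⟩, ?_⟩
    rcases hL : pvLabels d with _ | ⟨x, xs⟩
    · exact absurd hL (labels_ne_nil d)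
    · rw [hL] at hsuf
      rcases List.suffix_cons_iff.mp hsuf with heq | hsuf'
      · exfalso
        rw [hL, heq] at h2
        exact lt_irrefl _ h2
      · simpa using hsuf'
  · rintro ⟨⟨_, hz, _⟩, hsuf⟩
    have hsufL : pvLabels e <:+ pvLabels d := suffix_of_tail hsuf
    have hlen : (pvLabels e).length < (pvLabels d).length := by
      have h1 := hsuf.length_le
      rcases hL : pvLabels d with _ | ⟨x, xs⟩
      · exact absurd hL (labels_ne_nil d)
      · rw [hL] at h1; simp at h1; simp; omega
    refine ⟨by rw [elemS_labels] at hz; exact hz, hlen, (List.suffix_iff_eq_drop.mp hsufL).symm⟩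

lemma best_fold_spec (d : String) :
    ∀ (es : List String) (acc : Option String), (∀ b₀, acc = some b₀ → candB d b₀) →
    (match es.foldl (fun best e =>
        if e ≠ "" ∧ (pvLabels e).length < (pvLabels d).length ∧
            (pvLabels d).drop ((pvLabels d).length - (pvLabels e).length) = pvLabels e then
          match best with
          | none => some e
          | some b => if (pvLabels b).length < (pvLabels e).length then some e else best
        else best) acc with
    | none => acc = none ∧ ∀ e ∈ es, ¬ candB d e
    | some b => candB d b ∧ (acc = some b ∨ b ∈ es) ∧
        (∀ e ∈ es, candB d e → (pvLabels e).length ≤ (pvLabels b).length) ∧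
        (∀ b₀, acc = some b₀ → (pvLabels b₀).length ≤ (pvLabels b).length) : Prop) := by
  intro es
  induction es with
  | nil =>
    intro acc hacc
    rcases acc with _ | b
    · simp
    · simp only [List.foldl_nil]
      show candB d b ∧ (True ∨ b ∈ ([] : List String)) ∧
        (∀ e ∈ ([] : List String), candB d e → (pvLabels e).length ≤ (pvLabels b).length) ∧
        (∀ b₀, some b = some b₀ → (pvLabels b₀).length ≤ (pvLabels b).length)
      refine ⟨hacc b rfl, Or.inl trivial, by simp, ?_⟩
      rintro b₀ h
      injection h with h
      rw [h]
  | cons e es ih =>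
    intro acc hacc
    rw [List.foldl_cons]
    by_cases hce : candB d e
    · have hcond : (e ≠ "" ∧ (pvLabels e).length < (pvLabels d).length ∧
          (pvLabels d).drop ((pvLabels d).length - (pvLabels e).length) = pvLabels e) := hce
      rw [if_pos hcond]
      rcases acc with _ | b
      all_goals simp only []
      · have := ih (some e) (by rintro b₀ h; injection h with h; rw [← h]; exact hce)
        rcases hres : (es.foldl _ (some e)) with _ | b'
        · rw [hres] at this; exact absurd this.1 (by simp)
        · rw [hres] at this
          obtain ⟨hcb, hor, hmax, hacc'⟩ := this
          refine ⟨hcb, ?_, ?_, by simp⟩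
          · rcases hor with h | h
            · injection h with h; exact Or.inr (by simp [h])
            · exact Or.inr (by simp [h])
          · intro e' he' hce'
            rcases List.mem_cons.mp he' with rfl | he'
            · exact le_trans (hacc' e' rfl) (le_refl _)
            · exact hmax e' he' hce'
      · by_cases hlt : (pvLabels b).length < (pvLabels e).length
        · rw [if_pos hlt]
          have := ih (some e) (by rintro b₀ h; injection h with h; rw [← h]; exact hce)
          rcases hres : (es.foldl _ (some e)) with _ | b'
          · rw [hres] at this; exact absurd this.1 (by simp)
          · rw [hres] at this
            obtain ⟨hcb, hor, hmax, hacc'⟩ := this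
            refine ⟨hcb, ?_, ?_, ?_⟩
            · rcases hor with h | h
              · injection h with h; exact Or.inr (by simp [h])
              · exact Or.inr (by simp [h])
            · intro e' he' hce'
              rcases List.mem_cons.mp he' with rfl | he'
              · exact hacc' e' rfl
              · exact hmax e' he' hce'
            · rintro b₀ h
              injection h with h
              subst h
              exact le_trans (le_of_lt hlt) (hacc' e rfl)
        · rw [if_neg hlt]
          have := ih (some b) hacc
          rcases hres : (es.foldl _ (some b)) with _ | b'
          · rw [hres] at this; exact absurd this.1 (by simp)
          · rw [hres] at this
            obtain ⟨hcb, hor, hmax, hacc'⟩ := this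
            refine ⟨hcb, ?_, ?_, hacc'⟩
            · rcases hor with h | h
              · exact Or.inl h
              · exact Or.inr (by simp [h])
            · intro e' he' hce'
              rcases List.mem_cons.mp he' with rfl | he'
              · exact le_trans (le_of_not_gt hlt) (hacc' b rfl)
              · exact hmax e' he' hce'
    · rw [if_neg (by exact hce)]
      have := ih acc hacc
      rcases hres : (es.foldl _ acc) with _ | b'
      · rw [hres] at this
        exact ⟨this.1, fun e' he' => by
          rcases List.mem_cons.mp he' with rfl | h
          · exact hce
          · exact this.2 e' h⟩
      · rw [hres] at this
        obtain ⟨hcb, hor, hmax, hacc'⟩ := this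
        refine ⟨hcb, ?_, ?_, hacc'⟩
        · rcases hor with h | h
          · exact Or.inl h
          · exact Or.inr (by simp [h])
        · intro e' he' hce'
          rcases List.mem_cons.mp he' with rfl | he'
          · exact absurd hce' hce
          · exact hmax e' he' hce'

lemma suffix_eq_of_length {α : Type} {t1 t2 u : List α}
    (h1 : t1 <:+ u) (h2 : t2 <:+ u) (hl : t1.length = t2.length) : t1 = t2 := by
  rw [List.suffix_iff_eq_drop.mp h1, List.suffix_iff_eq_drop.mp h2, hl]

lemma labels_elemS_of_suffix_tail (d : String) (t : List (List Char))
    (hne : t ≠ []) (ht : t <:+ (pvLabels d).tail) : pvLabels (elemS t) = t :=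
  labels_elemS t hne (fun m hm =>
    labels_no_dot d m (List.mem_of_mem_tail (ht.subset hm)))

lemma anc_eq_best (domains : PySem.Set String) (d : String) :
    whileParent domains (get_parent_domain d) ((PySem.Chars.splitOn d.toList ['.']).length)
      = best_ancestor domains d := by
  rw [ancA_eq_chainF]
  have hb : best_ancestor domains d = domains.foldl (fun best e =>
      if e ≠ "" ∧ (pvLabels e).length < (pvLabels d).length ∧
          (pvLabels d).drop ((pvLabels d).length - (pvLabels e).length) = pvLabels e then
        match best with
        | none => some e
        | some b => if (pvLabels b).length < (pvLabels e).length then some e else best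
      else best) none := rfl
  rw [hb]
  have hspec := best_fold_spec d domains none (by simp)
  rcases hres : (domains.foldl (fun best e =>
      if e ≠ "" ∧ (pvLabels e).length < (pvLabels d).length ∧
          (pvLabels d).drop ((pvLabels d).length - (pvLabels e).length) = pvLabels e then
        match best with
        | none => some e
        | some b => if (pvLabels b).length < (pvLabels e).length then some e else best
      else best) none) with _ | b
  · rw [hres] at hspec
    obtain ⟨-, hnone⟩ := hspec
    rcases hch : chainF domains (pvLabels d).tail with _ | s
    · rw [hres]
    · exfalso
      obtain ⟨t, htu, hg, hs, -⟩ := chainF_some domains _ s hch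
      have hlab : pvLabels (elemS t) = t := labels_elemS_of_suffix_tail d t hg.1 htu
      have hcand : candB d (elemS t) := by
        rw [candB_iff domains d (elemS t) hg.2.2]
        rw [hlab]
        exact ⟨hg, htu⟩
      exact hnone (elemS t) hg.2.2 hcand
  · rw [hres] at hspec
    obtain ⟨hcb, hor, hmax, -⟩ := hspec
    have hbmem : b ∈ domains := by
      rcases hor with h | h
      · exact absurd h (by simp)
      · exact h
    have hbgood := (candB_iff domains d b hbmem).mp hcb
    rcases hch : chainF domains (pvLabels d).tail with _ | s
    · exfalso
      exact chainF_none domains _ hch (pvLabels b) hbgood.2 hbgood.1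
    · obtain ⟨t, htu, hg, hs, hmaxc⟩ := chainF_some domains _ s hch
      have hlab : pvLabels (elemS t) = t := labels_elemS_of_suffix_tail d t hg.1 htu
      have hcand : candB d (elemS t) := by
        rw [candB_iff domains d (elemS t) hg.2.2, hlab]
        exact ⟨hg, htu⟩
      have h1 : t.length ≤ (pvLabels b).length := by
        have := hmax (elemS t) hg.2.2 hcand
        rwa [hlab] at this
      have h2 : (pvLabels b).length ≤ t.length := hmaxc (pvLabels b) hbgood.2 hbgood.1
      have ht : pvLabels b = t := suffix_eq_of_length hbgood.2 htu (le_antisymm h2 h1)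
      have hbs : b = s := by
        rw [hs, ← ht, elemS_labels]
      rw [hres, hbs]

lemma items_foldl_insertOpt {κ π ν : Type} [BEq κ] [LawfulBEq κ]
    (f : κ → Option π) (g : κ → π → ν) (step : PySem.Dict κ ν → κ → PySem.Dict κ ν)
    (hstep : ∀ td x, step td x = match f x with | some p => td.insert x (g x p) | none => td) :
    ∀ (xs : List κ) (td : PySem.Dict κ ν), (∀ x ∈ xs, td.contains x = false) → xs.Nodup →
    (xs.foldl step td).items
      = td.items ++ xs.filterMap (fun x => (f x).map (fun p => (x, g x p))) := by
  intro xs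
  induction xs with
  | nil => intro td _ _; simp
  | cons x rest ih =>
    intro td hc hnd
    rw [List.foldl_cons, hstep]
    rcases hf : f x with _ | p
    · simp only []
      rw [ih td (fun y hy => hc y (by simp [hy])) (by simpa using hnd.of_cons)]
      simp [hf]
    · simp only []
      rw [ih (td.insert x (g x p)) (fun y hy => by
        rw [PySem.Dict.contains_insert]
        have hyx : y ≠ x := by
          rintro rfl
          exact (List.nodup_cons.mp hnd).1 hy
        simp [hyx, hc y (by simp [hy])]) (List.nodup_cons.mp hnd).2]
      rw [PySem.Dict.items_insert_of_not_contains td (g x p) (hc x (by simp))]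
      simp [hf]


lemma ofList_items_of_nodup {κ ν : Type} [BEq κ] [LawfulBEq κ] (l : List (κ × ν))
    (h : (l.map Prod.fst).Nodup) : (PySem.Dict.ofList l).items = l := by
  have : PySem.Dict.ofList l = l.foldl (fun acc p => acc.insert p.1 p.2) PySem.Dict.empty := rfl
  rw [this]
  have := PySem.Dict.items_foldl_insert_fresh l Prod.fst Prod.snd PySem.Dict.empty
    (fun a _ => PySem.Dict.contains_empty a.1) h
  simpa using this

lemma map_fst_pairs {ν : Type} (f : String → Option String) (g : String → String → ν) (xs : List String) :
    (xs.filterMap (fun d => (f d).map (fun b => (d, g d b)))).map Prod.fst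
      = xs.filter (fun d => (f d).isSome) := by
  induction xs with
  | nil => simp
  | cons x rest ih =>
    rcases hf : f x with _ | b <;> simp [hf, ih]

lemma main_eq (dlm : List (String × Int)) :
    find_hierarchy_conflicts_with_lines dlm = find_hierarchy_conflicts_with_lines_alt dlm := by
  rw [find_hierarchy_conflicts_with_lines, find_hierarchy_conflicts_with_lines_alt]
  set domains : PySem.Set String := PySem.Set.ofList (dlm.map Prod.fst) with hdom
  set lineMap : PySem.Dict String Int := PySem.Dict.ofList dlm with hlm
  have hnd : domains.Nodup := PySem.Set.nodup_ofList _
  have hanc : ∀ d, whileParent domains (get_parent_domain d) ((PySem.Chars.splitOn d.toList ['.']).length)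
      = best_ancestor domains d := fun d => anc_eq_best domains d
  have hitems := items_foldl_insertOpt
    (f := fun d => whileParent domains (get_parent_domain d) ((PySem.Chars.splitOn d.toList ['.']).length))
    (g := fun d p => (lineMap.getD d 0, p, lineMap.getD p 0))
    (step := fun td domain =>
      match whileParent domains (get_parent_domain domain) ((PySem.Chars.splitOn domain.toList ['.']).length) with
      | some parent => td.insert domain (lineMap.getD domain 0, parent, lineMap.getD parent 0)
      | none => td)
    (fun td x => by
      rcases h : whileParent domains (get_parent_domain x) ((PySem.Chars.splitOn x.toList ['.']).length) with _ | p <;>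
        simp only [h])
    domains PySem.Dict.empty (fun x _ => PySem.Dict.contains_empty x) hnd
  simp only [] at hitems
  have hfm : domains.filterMap (fun d =>
        (whileParent domains (get_parent_domain d) ((PySem.Chars.splitOn d.toList ['.']).length)).map
          (fun p => (d, (lineMap.getD d 0, p, lineMap.getD p 0))))
      = domains.filterMap (fun d =>
        (best_ancestor domains d).map (fun b => (d, (lineMap.getD d 0, b, lineMap.getD b 0)))) := by
    apply List.filterMap_congr
    intro d _
    rw [hanc d]
  have hkeysnd : ((domains.filterMap (fun d =>
      (best_ancestor domains d).map (fun b => (d, (lineMap.getD d 0, b, lineMap.getD b 0))))).map Prod.fst).Nodup := by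
    rw [map_fst_pairs]
    exact hnd.filter _
  have hA : (domains.foldl (fun td domain =>
      match whileParent domains (get_parent_domain domain) ((PySem.Chars.splitOn domain.toList ['.']).length) with
      | some parent => td.insert domain (lineMap.getD domain 0, parent, lineMap.getD parent 0)
      | none => td) PySem.Dict.empty).items
      = domains.filterMap (fun d =>
        (best_ancestor domains d).map (fun b => (d, (lineMap.getD d 0, b, lineMap.getD b 0)))) := by
    rw [hitems, hfm]
    simp [PySem.Dict.empty]
  have hB : (PySem.Dict.ofList (domains.filterMap (fun d =>
      (best_ancestor domains d).map (fun b => (d, (lineMap.getD d 0, b, lineMap.getD b 0)))))).items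
      = domains.filterMap (fun d =>
        (best_ancestor domains d).map (fun b => (d, (lineMap.getD d 0, b, lineMap.getD b 0)))) :=
    ofList_items_of_nodup _ hkeysnd
  refine Prod.ext ?_ ?_
  · -- keep components
    show PySem.Set.diff domains (PySem.Set.ofList (PySem.Dict.keys _)) = _
    rw [PySem.Dict.keys, hA, map_fst_pairs]
    simp only [PySem.Set.diff]
    apply List.filter_congr
    intro x hx
    rcases hbx : best_ancestor domains x with _ | b
    · have hnm : x ∉ PySem.Set.ofList (domains.filter (fun d => (best_ancestor domains d).isSome)) := by
        rw [PySem.Set.mem_ofList, List.mem_filter]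
        rintro ⟨-, hs⟩
        rw [hbx] at hs
        simp at hs
      have : PySem.Set.contains (PySem.Set.ofList (domains.filter (fun d => (best_ancestor domains d).isSome))) x = false := by
        rcases h : PySem.Set.contains _ x
        · rfl
        · exact absurd ((PySem.Set.contains_iff _ _).mp h) hnm
      rw [this]
      simp
    · have hm : x ∈ PySem.Set.ofList (domains.filter (fun d => (best_ancestor domains d).isSome)) := by
        rw [PySem.Set.mem_ofList, List.mem_filter]
        exact ⟨hx, by rw [hbx]; simp⟩
      rw [(PySem.Set.contains_iff _ _).mpr hm]
      simp
  · show (domains.foldl _ PySem.Dict.empty).items = (PySem.Dict.ofList _).items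
    rw [hA, hB]

-- ===== VERDICT (by name: the statement is the Claim_ definition above) =====
theorem find_hierarchy_conflicts_with_lines_spec : Claim_equal_find_hierarchy_conflicts_with_lines := by
  intro domain_line_map _
  unfold Spec_find_hierarchy_conflicts_with_lines
  exact main_eq domain_line_map
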